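-- pv_equiv track=rewrite | github.com/nbtpj/LMRecTest | GPTRec.py | mask_all_except
-- ===== SOURCE A (Python) =====
-- def mask_all_except(seq2mask: list, exception: list, mask_by: int = -100):
--     e_l = len(exception)
--     start_idx = 0
--     while start_idx < len(seq2mask):
--         is_overlap = start_idx + e_l <= len(seq2mask) \
--                      and all([a == b for a, b in zip(seq2mask[start_idx:start_idx + e_l], exception)])
--         if is_overlap:
--             start_idx += e_l
--         else:
--             seq2mask[start_idx] = mask_by
--             start_idx += 1
--     return seq2mask
-- ===== SOURCE B (Python) =====
-- def mask_all_except(seq2mask: list, exception: list, mask_by: int = -100):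
--     # Staged algorithm: (1) find ALL occurrence start positions of the pattern,
--     # (2) greedily select the leftmost non-overlapping ones, (3) rebuild the
--     # sequence, masking every position outside a selected interval.  Writes the
--     # result back into seq2mask so the caller-visible mutation matches A's.
--     n = len(seq2mask)
--     k = len(exception)
--     occs = [i for i in range(n - k + 1) if seq2mask[i:i + k] == exception]
--     chosen = []
--     t = 0
--     for i in occs:
--         if i >= t:
--             chosen.append(i)
--             t = i + k
--     out = []
--     ptr = 0
--     j = 0
--     while j < n:
--         if ptr < len(chosen) and chosen[ptr] == j:
--             out.extend(exception)
--             j += k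
--             ptr += 1
--         else:
--             out.append(mask_by)
--             j += 1
--     seq2mask[:] = out
--     return seq2mask
-- ===== Notes on version B (the rewrite author's own statement) =====
-- stated objective: alternative
-- what changed: B replaces A's single in-place scan by three staged passes: it first computes the list of ALL pattern occurrence positions, then greedily selects the leftmost non-overlapping ones, then rebuilds the sequence masking everything outside the selected intervals; Pre_ excludes an empty exception with a nonempty seq2mask, where A loops forever.
import Mathlib
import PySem

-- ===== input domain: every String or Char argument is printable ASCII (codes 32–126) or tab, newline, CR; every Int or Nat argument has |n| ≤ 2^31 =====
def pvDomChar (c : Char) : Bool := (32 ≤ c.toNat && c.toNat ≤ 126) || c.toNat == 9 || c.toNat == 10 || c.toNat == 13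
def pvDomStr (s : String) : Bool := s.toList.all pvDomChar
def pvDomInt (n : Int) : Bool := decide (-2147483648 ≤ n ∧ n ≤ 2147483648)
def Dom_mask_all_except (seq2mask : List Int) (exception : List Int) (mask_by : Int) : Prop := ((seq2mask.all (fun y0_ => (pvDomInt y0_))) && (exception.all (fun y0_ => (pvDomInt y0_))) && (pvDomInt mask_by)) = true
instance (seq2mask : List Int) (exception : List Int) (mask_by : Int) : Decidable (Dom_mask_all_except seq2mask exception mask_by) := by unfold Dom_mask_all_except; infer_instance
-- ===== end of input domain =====

-- B replaces A's single in-place scan by three staged passes (find all occurrence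
-- positions, greedily select the leftmost non-overlapping ones, rebuild with masking);
-- alternative decomposition, same asymptotic cost.
-- A mutates seq2mask in place and returns it; Python B performs the same mutation
-- (seq2mask[:] = out); the Lean equivalence is about the return value.


-- ===== PORT A =====
-- A's while loop; fuel only makes the recursion total (with exception = [] and a
-- nonempty seq2mask the Python loop never advances, i.e. diverges; excluded by Pre_).
def maskALoop (mask_by : Int) (exception : List Int) (seq : List Int) (start_idx : Nat) : Nat → List Int
  | 0 => seq
  | fuel+1 =>
    if start_idx < seq.length then
      if start_idx + exception.length ≤ seq.length ∧
          (((PySem.List.slice seq (some (start_idx : Int)) (some ((start_idx : Int) + (exception.length : Int)))).zip exception).all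
            (fun p => p.1 == p.2)) = true then
        maskALoop mask_by exception seq (start_idx + exception.length) fuel
      else
        maskALoop mask_by exception (seq.set start_idx mask_by) (start_idx + 1) fuel
    else seq

def mask_all_except (seq2mask : List Int) (exception : List Int) (mask_by : Int) : List Int :=
  maskALoop mask_by exception seq2mask 0 (seq2mask.length + 1)

-- ===== PORT B =====
-- Stage 1: all occurrence start positions of the pattern in the sequence.
def occList (seq e : List Int) : List Nat :=
  (List.range (seq.length + 1 - e.length)).filter
    (fun i => PySem.List.slice seq (some (i : Int)) (some ((i : Int) + (e.length : Int))) == e)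

-- Stage 2: greedy leftmost non-overlapping selection (B's for-loop over occs with threshold t).
def greedySel (k : Nat) : List Nat → Nat → List Nat
  | [], _ => []
  | i :: rest, t => if t ≤ i then i :: greedySel k rest (i + k) else greedySel k rest t

-- Stage 3: rebuild, masking everything outside chosen intervals (B's while loop;
-- fuel only makes it total, enough for every input Pre_ admits).
def buildOut (m : Int) (e : List Int) (k n : Nat) : Nat → List Nat → Nat → List Int
  | 0, _, _ => []
  | fuel+1, chosen, j =>
    if j < n then
      match chosen with
      | i :: rest =>
        if i = j then e ++ buildOut m e k n fuel rest (j + k)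
        else m :: buildOut m e k n fuel chosen (j + 1)
      | [] => m :: buildOut m e k n fuel [] (j + 1)
    else []

def mask_all_except_alt (seq2mask : List Int) (exception : List Int) (mask_by : Int) : List Int :=
  buildOut mask_by exception exception.length seq2mask.length (seq2mask.length + 1)
    (greedySel exception.length (occList seq2mask exception) 0) 0

-- ===== PRECONDITION & SPEC =====
-- Pre_ excludes exactly exception = [] with seq2mask ≠ [], where Python A loops forever
-- (start_idx never advances); it admits every input on which A returns.
def Pre_mask_all_except (seq2mask : List Int) (exception : List Int) (mask_by : Int) : Prop :=
  seq2mask = [] ∨ exception ≠ []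
instance (seq2mask : List Int) (exception : List Int) (mask_by : Int) : Decidable (Pre_mask_all_except seq2mask exception mask_by) := by unfold Pre_mask_all_except; infer_instance
def pvWitness_mask_all_except : List Int × List Int × Int := ([1, 2, 3, 2, 3], [2, 3], -100)

def Spec_mask_all_except (seq2mask : List Int) (exception : List Int) (mask_by : Int) (out : List Int) : Prop := out = mask_all_except_alt seq2mask exception mask_by
instance (seq2mask : List Int) (exception : List Int) (mask_by : Int) (out : List Int) : Decidable (Spec_mask_all_except seq2mask exception mask_by out) := by unfold Spec_mask_all_except; infer_instance

-- ===== CLAIM (what is proved, stated in full; the proofs are below) =====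
def Claim_equal_mask_all_except : Prop := ∀ (seq2mask : List Int) (exception : List Int) (mask_by : Int), Dom_mask_all_except seq2mask exception mask_by → Pre_mask_all_except seq2mask exception mask_by → Spec_mask_all_except seq2mask exception mask_by (mask_all_except seq2mask exception mask_by)

-- ===== LEMMAS AND PROOFS =====

-- Common reference function both ports are reduced to: the greedy masking recursion.
def gSpec (m : Int) (e : List Int) (seq0 : List Int) : Nat → Nat → List Int
  | 0, _ => []
  | fuel+1, j =>
    if j < seq0.length then
      if j + e.length ≤ seq0.length ∧ (seq0.drop j).take e.length = e then
        e ++ gSpec m e seq0 fuel (j + e.length)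
      else m :: gSpec m e seq0 fuel (j + 1)
    else []

lemma zip_all_beq_iff : ∀ (s t : List Int), s.length = t.length →
    (((s.zip t).all fun p => p.1 == p.2) = true ↔ s = t) := by
  intro s
  induction s with
  | nil => intro t h; cases t <;> simp_all
  | cons a s ih =>
    intro t h
    cases t with
    | nil => simp at h
    | cons b t =>
      simp only [List.zip_cons_cons, List.all_cons, Bool.and_eq_true, beq_iff_eq,
        List.cons.injEq]
      rw [ih t (by simpa using h)]

-- A's loop equals gSpec.
lemma loopA_eq (m : Int) (e : List Int) (he : e ≠ []) :
    ∀ (fa : Nat) (seq0 out : List Int) (j fb : Nat),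
      out.length = j → j ≤ seq0.length → seq0.length - j < fa → seq0.length - j < fb →
      maskALoop m e (out ++ seq0.drop j) j fa = out ++ gSpec m e seq0 fb j := by
  intro fa
  induction fa with
  | zero => intro _ _ _ _ _ _ h _; omega
  | succ fa ih =>
    intro seq0 out j fb hlen hj hfa hfb
    obtain ⟨fb, rfl⟩ : ∃ fb', fb = fb' + 1 := ⟨fb - 1, by omega⟩
    have hke : 1 ≤ e.length := by
      cases e with | nil => exact absurd rfl he | cons a t => simp
    have hA : (out ++ seq0.drop j).length = seq0.length := by
      simp [hlen]; omega
    by_cases hlt : j < seq0.length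
    · have hdrop : (out ++ seq0.drop j).drop j = seq0.drop j := by
        exact List.drop_left' hlen
      have hsliceA : PySem.List.slice (out ++ seq0.drop j) (some (j : Int))
          (some ((j : Int) + (e.length : Int))) = (seq0.drop j).take e.length := by
        rw [PySem.List.slice_natCast_add, hdrop]
      have hcond : (j + e.length ≤ (out ++ seq0.drop j).length ∧
            (((PySem.List.slice (out ++ seq0.drop j) (some (j : Int))
              (some ((j : Int) + (e.length : Int)))).zip e).all (fun p => p.1 == p.2)) = true)
          ↔ (j + e.length ≤ seq0.length ∧ (seq0.drop j).take e.length = e) := by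
        rw [hsliceA, hA]
        constructor
        · rintro ⟨hle, hall⟩
          have hlen' : ((seq0.drop j).take e.length).length = e.length := by
            simp; omega
          exact ⟨hle, (zip_all_beq_iff _ _ hlen').mp hall⟩
        · rintro ⟨hle, hEq⟩
          exact ⟨hle, (zip_all_beq_iff _ _ (by rw [hEq])).mpr hEq⟩
      rw [maskALoop, gSpec, if_pos (hA ▸ hlt), if_pos hlt]
      by_cases hm : j + e.length ≤ seq0.length ∧ (seq0.drop j).take e.length = e
      · rw [if_pos (hcond.mpr hm), if_pos hm]
        have hsplit : out ++ seq0.drop j = (out ++ e) ++ seq0.drop (j + e.length) := by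
          conv_lhs => rw [← List.take_append_drop e.length (seq0.drop j)]
          rw [hm.2, List.drop_drop, List.append_assoc]
        rw [hsplit, ih seq0 (out ++ e) (j + e.length) fb (by simp [hlen]) hm.1
          (by omega) (by omega), List.append_assoc]
      · rw [if_neg (by rw [hcond]; exact hm), if_neg hm]
        have hcons : seq0.drop j = seq0[j] :: seq0.drop (j + 1) :=
          List.drop_eq_getElem_cons hlt
        have hset : (out ++ seq0.drop j).set j m = (out ++ [m]) ++ seq0.drop (j + 1) := by
          rw [List.set_append_right _ _ (by omega), hlen, Nat.sub_self, hcons,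
            List.set_cons_zero, List.append_assoc, List.singleton_append]
        rw [hset, ih seq0 (out ++ [m]) (j + 1) fb (by simp [hlen]) (by omega) (by omega)
          (by omega), List.append_assoc, List.singleton_append]
    · have hj' : j = seq0.length := by omega
      rw [maskALoop, gSpec, if_neg (by rw [hA]; exact hlt), if_neg hlt]
      simp [hj']

-- Filtering out the elements the greedy threshold skips anyway does not change the selection.
lemma greedySel_filter (k : Nat) :
    ∀ (l : List Nat) (s t : Nat), s ≤ t →
      greedySel k (l.filter (fun i => s ≤ i)) t = greedySel k l t := by
  intro l
  induction l with
  | nil => intro s t _; rfl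
  | cons i rest ih =>
    intro s t hst
    by_cases hsi : s ≤ i
    · rw [List.filter_cons_of_pos (by simpa using hsi)]
      rw [greedySel, greedySel]
      by_cases hti : t ≤ i
      · rw [if_pos hti, if_pos hti, ih s (i + k) (le_trans hsi (Nat.le_add_right _ _))]
      · rw [if_neg hti, if_neg hti, ih s t hst]
    · rw [List.filter_cons_of_neg (by simpa using hsi), greedySel,
        if_neg (by omega), ih s t hst]

-- Raising the threshold below every element does not change the selection.
lemma greedySel_raise (k : Nat) (l : List Nat) (t t' : Nat) (htt : t ≤ t')
    (hall : ∀ i ∈ l, t' ≤ i) : greedySel k l t = greedySel k l t' := by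
  cases l with
  | nil => rfl
  | cons i rest =>
    have hi : t' ≤ i := hall i (List.mem_cons_self)
    rw [greedySel, greedySel, if_pos (le_trans htt hi), if_pos hi]

lemma mem_greedySel (k : Nat) : ∀ (l : List Nat) (t i : Nat), i ∈ greedySel k l t → i ∈ l := by
  intro l
  induction l with
  | nil => intro t i h; simp [greedySel] at h
  | cons a rest ih =>
    intro t i h
    rw [greedySel] at h
    split_ifs at h with hta
    · rcases List.mem_cons.mp h with h | h
      · exact h ▸ List.mem_cons_self
      · exact List.mem_cons_of_mem _ (ih _ _ h)
    · exact List.mem_cons_of_mem _ (ih _ _ h)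

lemma range_filter_ge_split (p : Nat → Bool) :
    ∀ (N j : Nat), j < N → p j = true →
      (List.range N).filter (fun i => decide (j ≤ i) && p i)
        = j :: (List.range N).filter (fun i => decide (j + 1 ≤ i) && p i) := by
  intro N
  induction N with
  | zero => intro j hj _; omega
  | succ N ih =>
    intro j hj hp
    rw [List.range_succ, List.filter_append, List.filter_append]
    by_cases hjN : j < N
    · rw [ih j hjN hp]
      have h1 : decide (j ≤ N) = true := by simp; omega
      have h2 : decide (j + 1 ≤ N) = true := by simp; omega
      simp only [List.filter_cons, List.filter_nil, h1, h2, Bool.true_and, List.cons_append]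
    · have hje : j = N := by omega
      subst hje
      have hfront : ∀ (q : Nat → Bool),
          (List.range j).filter (fun i => decide (j ≤ i) && q i) = [] := by
        intro q
        apply List.filter_eq_nil_iff.mpr
        intro a ha
        simp only [List.mem_range] at ha
        simp only [Bool.and_eq_true, decide_eq_true_eq]
        omega
      have hfront' : (List.range j).filter (fun i => decide (j + 1 ≤ i) && p i) = [] := by
        apply List.filter_eq_nil_iff.mpr
        intro a ha
        simp only [List.mem_range] at ha
        simp only [Bool.and_eq_true, decide_eq_true_eq]
        omega
      rw [hfront p, hfront']
      simp [hp]

lemma range_filter_ge_succ (p : Nat → Bool) (N j : Nat) (h : ¬ (j < N ∧ p j = true)) :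
    (List.range N).filter (fun i => decide (j ≤ i) && p i)
      = (List.range N).filter (fun i => decide (j + 1 ≤ i) && p i) := by
  apply List.filter_congr
  intro a ha
  simp only [List.mem_range] at ha
  by_cases haj : a = j
  · subst haj
    have hp : p a = false := by
      by_contra hc
      exact h ⟨ha, by simpa using hc⟩
    simp [hp]
  · have : (decide (j ≤ a)) = (decide (j + 1 ≤ a)) := by
      by_cases h1 : j ≤ a <;> simp_all <;> omega
    rw [this]

lemma buildOut_cons (m : Int) (e : List Int) (k n fuel i : Nat) (rest : List Nat) (j : Nat) :
    buildOut m e k n (fuel + 1) (i :: rest) j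
      = if j < n then
          (if i = j then e ++ buildOut m e k n fuel rest (j + k)
           else m :: buildOut m e k n fuel (i :: rest) (j + 1))
        else [] := rfl

lemma buildOut_nil (m : Int) (e : List Int) (k n fuel j : Nat) :
    buildOut m e k n (fuel + 1) [] j
      = if j < n then m :: buildOut m e k n fuel [] (j + 1) else [] := rfl

-- B's staged passes equal gSpec.
lemma build_eq_g (m : Int) (e : List Int) (he : e ≠ []) (seq0 : List Int) :
    ∀ (fuel j : Nat), seq0.length - j < fuel →
      buildOut m e e.length seq0.length fuel
        (greedySel e.length ((occList seq0 e).filter (fun i => j ≤ i)) j) j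
        = gSpec m e seq0 fuel j := by
  have hke : 1 ≤ e.length := by
    cases e with | nil => exact absurd rfl he | cons a t => simp
  intro fuel
  induction fuel with
  | zero => intro j h; omega
  | succ fuel ih =>
    intro j hfj
    set n := seq0.length with hn
    set k := e.length with hk
    have hocc : (occList seq0 e).filter (fun i => j ≤ i)
        = (List.range (n + 1 - k)).filter
            (fun i => decide (j ≤ i) &&
              (PySem.List.slice seq0 (some (i : Int)) (some ((i : Int) + (k : Int))) == e)) := by
      rw [occList, List.filter_filter]
    have hocc1 : (occList seq0 e).filter (fun i => j + 1 ≤ i)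
        = (List.range (n + 1 - k)).filter
            (fun i => decide (j + 1 ≤ i) &&
              (PySem.List.slice seq0 (some (i : Int)) (some ((i : Int) + (k : Int))) == e)) := by
      rw [occList, List.filter_filter]
    have hslice : ∀ i : Nat, PySem.List.slice seq0 (some (i : Int)) (some ((i : Int) + (k : Int)))
        = (seq0.drop i).take k := by
      intro i; rw [hk, PySem.List.slice_natCast_add]
    by_cases hlt : j < n
    · by_cases hm : j + k ≤ n ∧ (seq0.drop j).take k = e
      · -- match at j: occurrence list starts with j
        have hjN : j < n + 1 - k := by omega
        have hpj : (PySem.List.slice seq0 (some (j : Int)) (some ((j : Int) + (k : Int))) == e)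
            = true := by rw [hslice]; simpa using hm.2
        rw [hocc, range_filter_ge_split _ _ _ hjN hpj, greedySel, if_pos le_rfl]
        have htail : greedySel k ((List.range (n + 1 - k)).filter
              (fun i => decide (j + 1 ≤ i) &&
                (PySem.List.slice seq0 (some (i : Int)) (some ((i : Int) + (k : Int))) == e)))
              (j + k)
            = greedySel k ((occList seq0 e).filter (fun i => j + k ≤ i)) (j + k) := by
          rw [← hocc1, greedySel_filter k _ (j + 1) (j + k) (by omega),
            greedySel_filter k _ (j + k) (j + k) le_rfl]
        rw [htail, buildOut_cons, if_pos hlt, if_pos rfl, ih (j + k) (by omega),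
          gSpec, if_pos hlt, if_pos hm]
      · -- no match at j
        have hnp : ¬ (j < n + 1 - k ∧
            (PySem.List.slice seq0 (some (j : Int)) (some ((j : Int) + (k : Int))) == e) = true) := by
          rintro ⟨h1, h2⟩
          rw [hslice] at h2
          exact hm ⟨by omega, by simpa using h2⟩
        have hchosen : greedySel k ((occList seq0 e).filter (fun i => j ≤ i)) j
            = greedySel k ((occList seq0 e).filter (fun i => j + 1 ≤ i)) (j + 1) := by
          rw [hocc, range_filter_ge_succ _ _ _ hnp, ← hocc1]
          exact greedySel_raise k _ j (j + 1) (by omega)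
            (fun i hi => by simpa using (List.of_mem_filter hi))
        rw [hchosen]
        have hstep : buildOut m e k n (fuel + 1)
              (greedySel k ((occList seq0 e).filter (fun i => j + 1 ≤ i)) (j + 1)) j
            = m :: buildOut m e k n fuel
              (greedySel k ((occList seq0 e).filter (fun i => j + 1 ≤ i)) (j + 1)) (j + 1) := by
          cases hc : greedySel k ((occList seq0 e).filter (fun i => j + 1 ≤ i)) (j + 1) with
          | nil => rw [buildOut_nil, if_pos hlt]
          | cons i rest =>
            have hi : i ∈ (occList seq0 e).filter (fun i => j + 1 ≤ i) :=
              mem_greedySel k _ _ _ (hc ▸ List.mem_cons_self)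
            have : j + 1 ≤ i := by simpa using (List.of_mem_filter hi)
            rw [buildOut_cons, if_pos hlt, if_neg (by omega)]
        rw [hstep, ih (j + 1) (by omega), gSpec, if_pos hlt, if_neg hm]
    · rw [gSpec, if_neg hlt]
      cases greedySel k ((occList seq0 e).filter (fun i => j ≤ i)) j with
      | nil => rw [buildOut_nil, if_neg hlt]
      | cons i rest => rw [buildOut_cons, if_neg hlt]

-- ===== VERDICT (by name: the statement is the Claim_ definition above) =====
theorem mask_all_except_spec : Claim_equal_mask_all_except := by
  intro seq e m _ hpre
  unfold Spec_mask_all_except mask_all_except mask_all_except_alt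
  rcases hpre with rfl | he
  · simp [maskALoop, buildOut]
  · have hA := loopA_eq m e he (seq.length + 1) seq [] 0 (seq.length + 1) rfl (by omega)
      (by omega) (by omega)
    simp only [List.nil_append, List.drop_zero] at hA
    rw [hA, ← build_eq_g m e he seq (seq.length + 1) 0 (by omega)]
    congr 1
    rw [List.filter_eq_self.mpr (by intro a _; simp)]
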